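-- pv_equiv track=rewrite | github.com/baxkspace/algorithm-Xplosion | Programmers/택배_배달과_수거하기/baxkspace/solution.py | solution
-- ===== SOURCE A (Python) =====
-- def solution(cap, n, deliveries, pickups):
--     pick = 0
--     deliv = cap
--     answer = 0
--
--     for i in range(n-1, -1, -1):
--         pick += pickups[i]
--         deliv -= deliveries[i]
--
--         while pick > 0 or deliv < cap:
--             pick -= cap
--             deliv += cap
--             answer += i+1
--
--     return 2 * answer
-- ===== SOURCE B (Python) =====
-- def solution(cap, n, deliveries, pickups):
--     d = p = trips = answer = 0
--     for i in range(n - 1, -1, -1):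
--         d += deliveries[i]
--         p += pickups[i]
--         need = max(trips, -(-d // cap), -(-p // cap))
--         answer += (i + 1) * (need - trips)
--         trips = need
--     return 2 * answer
-- ===== Notes on version B (the rewrite author's own statement) =====
-- stated objective: alternative
-- what changed: Replaced A's inner 'while' loop (one iteration per truck trip, state pick/deliv) by ceiling-division arithmetic: one backward pass keeps suffix load sums and computes the trips needed at each house in O(1); total work no longer depends on the load/capacity ratio (not measurably faster on the random timing inputs).
-- outside the precondition, e.g. on solution(0, 1, [0], [0]): A returns 0, B raises ZeroDivisionError
import Mathlib
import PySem

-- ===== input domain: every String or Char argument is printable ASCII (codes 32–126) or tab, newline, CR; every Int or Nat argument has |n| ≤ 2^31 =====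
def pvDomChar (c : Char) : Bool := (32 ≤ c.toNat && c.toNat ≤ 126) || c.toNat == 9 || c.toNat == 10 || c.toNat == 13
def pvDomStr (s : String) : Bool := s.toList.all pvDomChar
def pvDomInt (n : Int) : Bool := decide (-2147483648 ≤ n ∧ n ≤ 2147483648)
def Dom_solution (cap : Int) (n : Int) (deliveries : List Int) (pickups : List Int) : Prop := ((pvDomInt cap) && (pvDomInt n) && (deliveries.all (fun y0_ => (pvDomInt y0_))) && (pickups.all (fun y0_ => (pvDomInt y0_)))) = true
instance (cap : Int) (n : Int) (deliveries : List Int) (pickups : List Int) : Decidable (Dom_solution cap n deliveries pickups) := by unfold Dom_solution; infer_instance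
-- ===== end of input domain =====

-- B replaces A's inner while loop (one iteration per truck trip) by ceiling-division
-- arithmetic in a single backward pass over suffix load sums (objective: alternative algorithm).

-- ===== PORT A =====
-- A's inner 'while pick > 0 or deliv < cap' loop, with a fuel argument that only makes the
-- recursion total: for cap ≥ 1 (Pre_) the fuel below never runs out (Python diverges for cap ≤ 0).
def solWhileGo (cap : Int) (i : Int) : Nat → Int → Int → Int → Int × Int × Int
  | 0, pick, deliv, answer => (pick, deliv, answer)
  | fuel + 1, pick, deliv, answer =>
    if 0 < pick ∨ deliv < cap then
      solWhileGo cap i fuel (pick - cap) (deliv + cap) (answer + (i + 1))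
    else (pick, deliv, answer)

def solWhile (cap : Int) (i : Int) (pick : Int) (deliv : Int) (answer : Int) : Int × Int × Int :=
  solWhileGo cap i ((max pick 0) + (max (cap - deliv) 0)).toNat pick deliv answer

def solution (cap : Int) (n : Int) (deliveries : List Int) (pickups : List Int) : Int :=
  -- state = (pick, deliv, answer); pickups[i] / deliveries[i] total via pyGetD, in range under Pre_
  2 * ((PySem.List.pyRange (n - 1) (-1) (-1)).foldl
    (fun (st : Int × Int × Int) (i : Int) =>
      solWhile cap i (st.1 + PySem.List.pyGetD pickups i 0)
        (st.2.1 - PySem.List.pyGetD deliveries i 0) st.2.2)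
    (0, cap, 0)).2.2

-- ===== PORT B =====
def solution_alt (cap : Int) (n : Int) (deliveries : List Int) (pickups : List Int) : Int :=
  -- state = (d, p, trips, answer); need = max(trips, -(-d // cap), -(-p // cap))
  2 * ((PySem.List.pyRange (n - 1) (-1) (-1)).foldl
    (fun (st : Int × Int × Int × Int) (i : Int) =>
      let d := st.1 + PySem.List.pyGetD deliveries i 0
      let p := st.2.1 + PySem.List.pyGetD pickups i 0
      let need := max (max st.2.2.1 (-(PySem.Int.floordiv (-d) cap))) (-(PySem.Int.floordiv (-p) cap))
      (d, p, need, st.2.2.2 + (i + 1) * (need - st.2.2.1)))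
    (0, 0, 0, 0)).2.2.2

-- ===== PRECONDITION & SPEC =====
-- Pre_ excludes cap ≤ 0 (A's while loop diverges for any positive load and returns only on
-- degenerate all-nonpositive loads, where B's ceiling division raises or disagrees) and
-- n exceeding a list length (Python A raises IndexError).
def Pre_solution (cap : Int) (n : Int) (deliveries : List Int) (pickups : List Int) : Prop :=
  1 ≤ cap ∧ n ≤ (deliveries.length : Int) ∧ n ≤ (pickups.length : Int)
instance (cap : Int) (n : Int) (deliveries : List Int) (pickups : List Int) : Decidable (Pre_solution cap n deliveries pickups) := by unfold Pre_solution; infer_instance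

def pvWitness_solution : Int × Int × List Int × List Int := (4, 2, [1, 2], [3, 1])

def Spec_solution (cap : Int) (n : Int) (deliveries : List Int) (pickups : List Int) (out : Int) : Prop := out = solution_alt cap n deliveries pickups
instance (cap : Int) (n : Int) (deliveries : List Int) (pickups : List Int) (out : Int) : Decidable (Spec_solution cap n deliveries pickups out) := by unfold Spec_solution; infer_instance

-- ===== CLAIM (what is proved, stated in full; the proofs are below) =====
def Claim_equal_solution : Prop := ∀ (cap : Int) (n : Int) (deliveries : List Int) (pickups : List Int), Dom_solution cap n deliveries pickups → Pre_solution cap n deliveries pickups → Spec_solution cap n deliveries pickups (solution cap n deliveries pickups)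

-- ===== LEMMAS AND PROOFS =====

-- ceiling division -((-a) // cap), as B computes it
def pvCeil (cap a : Int) : Int := -(PySem.Int.floordiv (-a) cap)

lemma pvCeil_le_iff (cap a q : Int) (hc : 0 < cap) : pvCeil cap a ≤ q ↔ a ≤ q * cap := by
  unfold pvCeil
  rw [PySem.Int.floordiv_eq_ediv_of_pos hc, neg_le, Int.le_ediv_iff_mul_le hc]
  constructor <;> intro h <;> nlinarith

lemma pvCeil_sub_cap (cap a : Int) (hc : 0 < cap) :
    pvCeil cap (a - cap) = pvCeil cap a - 1 := by
  unfold pvCeil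
  rw [PySem.Int.floordiv_eq_ediv_of_pos hc, PySem.Int.floordiv_eq_ediv_of_pos hc]
  have : -(a - cap) = -a + 1 * cap := by ring
  rw [this, Int.add_mul_ediv_right _ _ (by omega : cap ≠ 0)]
  ring

lemma pvCeil_sub_mul_cap (cap a t : Int) (hc : 0 < cap) :
    pvCeil cap (a - t * cap) = pvCeil cap a - t := by
  unfold pvCeil
  rw [PySem.Int.floordiv_eq_ediv_of_pos hc, PySem.Int.floordiv_eq_ediv_of_pos hc]
  have : -(a - t * cap) = -a + t * cap := by ring
  rw [this, Int.add_mul_ediv_right _ _ (by omega : cap ≠ 0)]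
  ring

-- closed form of A's inner while loop
lemma solWhileGo_eq (cap i : Int) (hc : 0 < cap) :
    ∀ (m fuel : Nat) (pick deliv ans : Int),
      (max (pvCeil cap pick) (pvCeil cap (cap - deliv))).toNat = m → m ≤ fuel →
      solWhileGo cap i fuel pick deliv ans =
        (pick - cap * m, deliv + cap * m, ans + (i + 1) * m) := by
  intro m
  induction m with
  | zero =>
    intro fuel pick deliv ans hm _hf
    have h1 : pvCeil cap pick ≤ 0 := by omega
    have h2 : pvCeil cap (cap - deliv) ≤ 0 := by omega
    rw [pvCeil_le_iff cap pick 0 hc] at h1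
    rw [pvCeil_le_iff cap (cap - deliv) 0 hc] at h2
    cases fuel with
    | zero => rw [solWhileGo]; norm_num
    | succ f =>
      rw [solWhileGo, if_neg (by omega : ¬ (0 < pick ∨ deliv < cap))]
      norm_num
  | succ m ih =>
    intro fuel pick deliv ans hm hf
    have hcond : 0 < pick ∨ deliv < cap := by
      by_contra hn
      rw [not_or, not_lt, not_lt] at hn
      have h1 : pvCeil cap pick ≤ 0 := by
        rw [pvCeil_le_iff cap pick 0 hc]; omega
      have h2 : pvCeil cap (cap - deliv) ≤ 0 := by
        rw [pvCeil_le_iff cap (cap - deliv) 0 hc]; omega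
      omega
    cases fuel with
    | zero => omega
    | succ f =>
      rw [solWhileGo, if_pos hcond]
      have e1 : pvCeil cap (pick - cap) = pvCeil cap pick - 1 := pvCeil_sub_cap cap pick hc
      have e2 : pvCeil cap (cap - (deliv + cap)) = pvCeil cap (cap - deliv) - 1 := by
        have h : cap - (deliv + cap) = (cap - deliv) - cap := by ring
        rw [h]; exact pvCeil_sub_cap cap (cap - deliv) hc
      rw [ih f (pick - cap) (deliv + cap) (ans + (i + 1)) (by omega) (by omega)]
      refine Prod.ext ?_ (Prod.ext ?_ ?_) <;> simp only [] <;> push_cast <;> ring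

-- the ceiling of a/cap is at most max a 0, so the fuel in solWhile suffices
lemma pvCeil_le_max (cap a : Int) (hc : 0 < cap) : pvCeil cap a ≤ max a 0 := by
  rw [pvCeil_le_iff cap a (max a 0) hc]
  rcases le_total a 0 with h | h
  · simp [max_eq_right h]; omega
  · rw [max_eq_left h]; nlinarith

lemma solWhile_eq (cap i : Int) (hc : 0 < cap) (pick deliv ans : Int) :
    solWhile cap i pick deliv ans =
      (pick - cap * ((max (pvCeil cap pick) (pvCeil cap (cap - deliv))).toNat : Int),
       deliv + cap * ((max (pvCeil cap pick) (pvCeil cap (cap - deliv))).toNat : Int),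
       ans + (i + 1) * ((max (pvCeil cap pick) (pvCeil cap (cap - deliv))).toNat : Int)) := by
  apply solWhileGo_eq cap i hc _ _ pick deliv ans rfl
  have h1 := pvCeil_le_max cap pick hc
  have h2 := pvCeil_le_max cap (cap - deliv) hc
  omega

-- invariant linking A's state (pick, deliv, answer) with B's state (d, p, trips, answer)
def pvRel (cap : Int) (a : Int × Int × Int) (b : Int × Int × Int × Int) : Prop :=
  a.1 = b.2.1 - cap * b.2.2.1 ∧ a.2.1 = cap - b.1 + cap * b.2.2.1 ∧ a.2.2 = b.2.2.2

lemma pvRel_fold (cap : Int) (hc : 0 < cap) (deliveries pickups : List Int) :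
    ∀ (l : List Int) (a : Int × Int × Int) (b : Int × Int × Int × Int),
      pvRel cap a b →
      pvRel cap
        (l.foldl (fun (st : Int × Int × Int) (i : Int) =>
          solWhile cap i (st.1 + PySem.List.pyGetD pickups i 0)
            (st.2.1 - PySem.List.pyGetD deliveries i 0) st.2.2) a)
        (l.foldl (fun (st : Int × Int × Int × Int) (i : Int) =>
          let d := st.1 + PySem.List.pyGetD deliveries i 0
          let p := st.2.1 + PySem.List.pyGetD pickups i 0
          let need := max (max st.2.2.1 (-(PySem.Int.floordiv (-d) cap))) (-(PySem.Int.floordiv (-p) cap))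
          (d, p, need, st.2.2.2 + (i + 1) * (need - st.2.2.1))) b) := by
  intro l
  induction l with
  | nil => intro a b h; exact h
  | cons i l ih =>
    intro a b h
    simp only [List.foldl_cons]
    apply ih
    obtain ⟨ad, ap, at_, ab⟩ := b
    obtain ⟨pk, dv, an⟩ := a
    obtain ⟨h1, h2, h3⟩ := h
    simp only [] at h1 h2 h3
    have e1 : pvCeil cap (pk + PySem.List.pyGetD pickups i 0)
        = pvCeil cap (ap + PySem.List.pyGetD pickups i 0) - at_ := by
      have h : pk + PySem.List.pyGetD pickups i 0
          = (ap + PySem.List.pyGetD pickups i 0) - at_ * cap := by rw [h1]; ring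
      rw [h]; exact pvCeil_sub_mul_cap cap _ at_ hc
    have e2 : pvCeil cap (cap - (dv - PySem.List.pyGetD deliveries i 0))
        = pvCeil cap (ad + PySem.List.pyGetD deliveries i 0) - at_ := by
      have h : cap - (dv - PySem.List.pyGetD deliveries i 0)
          = (ad + PySem.List.pyGetD deliveries i 0) - at_ * cap := by rw [h2]; ring
      rw [h]; exact pvCeil_sub_mul_cap cap _ at_ hc
    have hw := solWhile_eq cap i hc
      (pk + PySem.List.pyGetD pickups i 0) (dv - PySem.List.pyGetD deliveries i 0) an
    have hcast : (((max (pvCeil cap (pk + PySem.List.pyGetD pickups i 0))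
        (pvCeil cap (cap - (dv - PySem.List.pyGetD deliveries i 0)))).toNat : Int))
        = max (max at_ (pvCeil cap (ad + PySem.List.pyGetD deliveries i 0)))
            (pvCeil cap (ap + PySem.List.pyGetD pickups i 0)) - at_ := by
      rw [e1, e2]
      generalize pvCeil cap (ap + PySem.List.pyGetD pickups i 0) = X
      generalize pvCeil cap (ad + PySem.List.pyGetD deliveries i 0) = Y
      omega
    show pvRel cap
      (solWhile cap i (pk + PySem.List.pyGetD pickups i 0)
        (dv - PySem.List.pyGetD deliveries i 0) an)
      (ad + PySem.List.pyGetD deliveries i 0, ap + PySem.List.pyGetD pickups i 0,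
        max (max at_ (pvCeil cap (ad + PySem.List.pyGetD deliveries i 0)))
          (pvCeil cap (ap + PySem.List.pyGetD pickups i 0)),
        ab + (i + 1) * (max (max at_ (pvCeil cap (ad + PySem.List.pyGetD deliveries i 0)))
          (pvCeil cap (ap + PySem.List.pyGetD pickups i 0)) - at_))
    rw [hw]
    refine ⟨?_, ?_, ?_⟩ <;> simp only [] <;> rw [hcast]
    · rw [h1]; ring
    · rw [h2]; ring
    · rw [h3]

-- ===== VERDICT (by name: the statement is the Claim_ definition above) =====
theorem solution_spec : Claim_equal_solution := by
  intro cap n deliveries pickups _hdom hpre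
  obtain ⟨hc, _, _⟩ := hpre
  unfold Spec_solution solution solution_alt
  have h := pvRel_fold cap (by omega) deliveries pickups
    (PySem.List.pyRange (n - 1) (-1) (-1)) (0, cap, 0) (0, 0, 0, 0)
    ⟨by norm_num, by norm_num, rfl⟩
  rw [h.2.2]
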